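-- pv_equiv track=rewrite | github.com/iocanel/advent-of-code | 2023/day01/b.py | line_to_number
-- ===== SOURCE A (Python) =====
-- def as_number(str):
--     numbers = {
--         "one": 1,
--         "two": 2,
--         "three": 3,
--         "four": 4,
--         "five": 5,
--         "six": 6,
--         "seven": 7,
--         "eight": 8,
--         "nine": 9,
--         "0": 0
--     }
--     for word, num in numbers.items():
--         if str.lower().endswith(word):
--             return num
--     return -1
--
-- def line_to_number(line):
--     first_digit = -1
--     last_digit = -1
--     for index, char in enumerate(line):
--             is_digit = char.isdigit()
--             if is_digit:
--                 if first_digit < 0: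
--                     first_digit = int(char)
--                 last_digit = int(char)
--             else:
--                 sub_str = line[0:index+1]
--                 num = as_number(sub_str)
--                 if num >= 0:
--                     if first_digit < 0:
--                         first_digit = num
--                     last_digit = num
--     num = (10 * first_digit + last_digit)
--     return num
-- ===== SOURCE B (Python) =====
-- WORDS = ("one", "two", "three", "four", "five", "six", "seven", "eight", "nine")
--
--
-- def _token_at_end(s, j):
--     """Value of the digit token (literal digit or spelled word) ending at index j
--     of the lowercase string s, or None."""
--     c = s[j]
--     if c.isdigit():
--         return int(c)
--     for v, w in enumerate(WORDS, 1):
--         if j + 1 >= len(w) and s[j + 1 - len(w):j + 1] == w: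
--             return v
--     return None
--
--
-- def line_to_number(line):
--     s = line.lower()
--     n = len(s)
--     first = -1
--     for j in range(n):
--         v = _token_at_end(s, j)
--         if v is not None:
--             first = v
--             break
--     last = -1
--     for j in range(n - 1, -1, -1):
--         v = _token_at_end(s, j)
--         if v is not None:
--             last = v
--             break
--     return 10 * first + last
-- ===== Notes on version B (the rewrite author's own statement) =====
-- stated objective: faster
-- what changed: A makes one stateful pass keeping first/last sentinels and, at every non-digit position, copies and lowercases the whole prefix (line[0:i+1].lower()) to endswith-test all nine words; B lowercases the line once and replaces the stateful pass by two independent early-exit scans - forward for the first token, backward for the last - each testing only a <=5-character window per position.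
import Mathlib
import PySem

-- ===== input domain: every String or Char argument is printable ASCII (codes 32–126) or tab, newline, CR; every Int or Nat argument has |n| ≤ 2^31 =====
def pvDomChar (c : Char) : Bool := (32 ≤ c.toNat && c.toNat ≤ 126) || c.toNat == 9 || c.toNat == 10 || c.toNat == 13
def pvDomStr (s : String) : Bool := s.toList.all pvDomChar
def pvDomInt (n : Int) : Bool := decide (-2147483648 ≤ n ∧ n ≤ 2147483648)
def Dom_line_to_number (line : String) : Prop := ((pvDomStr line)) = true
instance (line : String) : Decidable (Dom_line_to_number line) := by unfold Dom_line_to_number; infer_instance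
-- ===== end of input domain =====

-- B: instead of A's single stateful pass that lowercases and endswith-scans a fresh copy of the
-- whole prefix at every position, B lowercases once and does two early-exit scans (forward for
-- the first token, backward for the last), each looking only at a bounded window per position.


-- ===== PORT A =====

-- A's dict literal, in insertion order
def as_number_items : List (String × Int) :=
  [("one", 1), ("two", 2), ("three", 3), ("four", 4), ("five", 5),
   ("six", 6), ("seven", 7), ("eight", 8), ("nine", 9), ("0", 0)]

-- the for/return loop of as_number: the first item whose word the lowered string ends with
def as_number (s : String) : Int :=
  match as_number_items.findSome?
      (fun wn => if PySem.Str.endswith (PySem.Str.lower s) wn.1 then some wn.2 else none) with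
  | some n => n
  | none => -1

def line_to_number (line : String) : Int :=
  let st := (PySem.List.enumerate line.toList 0).foldl
    (fun (st : Int × Int) (ic : Int × Char) =>
      let first_digit := st.1
      let last_digit := st.2
      let index := ic.1
      let char := ic.2
      let is_digit := PySem.Chars.isdigit char
      if is_digit then
        -- int(char): char is a digit here, so ofChars? is some
        let d := (PySem.Int.ofChars? [char]).getD 0
        (if first_digit < 0 then d else first_digit, d)
      else
        let sub_str := PySem.Str.slice line (some 0) (some (index + 1))
        let num := as_number sub_str
        if num ≥ 0 then
          (if first_digit < 0 then num else first_digit, num)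
        else
          (first_digit, last_digit))
    (-1, -1)
  10 * st.1 + st.2

-- ===== PORT B =====

-- WORDS paired with their values (enumerate(WORDS, 1)), the words as char lists
def pyWords : List (Int × List Char) :=
  [(1, ['o','n','e']), (2, ['t','w','o']), (3, ['t','h','r','e','e']),
   (4, ['f','o','u','r']), (5, ['f','i','v','e']), (6, ['s','i','x']),
   (7, ['s','e','v','e','n']), (8, ['e','i','g','h','t']), (9, ['n','i','n','e'])]

-- _token_at_end(s, j): value of the token ending at index j of the lowercase s, or None;
-- j < s.length at every call site, so s[j] is ported as s.getD j ' '
def tokenAtEnd (s : List Char) (j : Nat) : Option Int :=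
  let c := s.getD j ' '
  if PySem.Chars.isdigit c then
    some ((PySem.Int.ofChars? [c]).getD 0)  -- int(c): c is a digit here, so ofChars? is some
  else
    pyWords.findSome? (fun vw =>
      if (decide (j + 1 ≥ vw.2.length)
          && (PySem.List.slice s (some ((j : Int) + 1 - (vw.2.length : Int))) (some ((j : Int) + 1)) == vw.2)) then
        some vw.1
      else none)

def line_to_number_alt (line : String) : Int :=
  let s := (PySem.Str.lower line).toList
  let n := s.length
  -- forward scan with break
  let first := ((List.range n).findSome? (fun j => tokenAtEnd s j)).getD (-1)
  -- backward scan with break: range(n-1, -1, -1)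
  let last := ((List.range n).reverse.findSome? (fun j => tokenAtEnd s j)).getD (-1)
  10 * first + last

-- ===== PRECONDITION & SPEC =====
def Spec_line_to_number (line : String) (out : Int) : Prop := out = line_to_number_alt line
instance (line : String) (out : Int) : Decidable (Spec_line_to_number line out) := by unfold Spec_line_to_number; infer_instance

-- ===== CLAIM (what is proved, stated in full; the proofs are below) =====
def Claim_equal_line_to_number : Prop := ∀ (line : String), Dom_line_to_number line → Spec_line_to_number line (line_to_number line)

-- ===== LEMMAS AND PROOFS =====

lemma cond_eq (s w : List Char) (i : Nat) (hi : i < s.length) :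
    PySem.Chars.endswith (s.take (i+1)) w
    = (decide (i + 1 ≥ w.length)
       && (PySem.List.slice s (some ((i : Int) + 1 - (w.length : Int))) (some ((i : Int) + 1)) == w)) := by
  rw [Bool.eq_iff_iff]
  simp only [Bool.and_eq_true, decide_eq_true_eq, beq_iff_eq, ge_iff_le]
  rw [PySem.Chars.endswith_iff, List.suffix_iff_eq_drop]
  constructor
  · intro h
    have hle : w.length ≤ i + 1 := by
      have hl := congrArg List.length h
      simp only [List.length_drop, List.length_take] at hl
      omega
    refine ⟨hle, ?_⟩
    have hlt : (s.take (i+1)).length = i + 1 := by rw [List.length_take]; omega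
    rw [hlt, List.drop_take] at h
    have harith : i + 1 - (i + 1 - w.length) = w.length := by omega
    rw [harith] at h
    rw [show ((i : Int) + 1 - (w.length : Int)) = ((i + 1 - w.length : Nat) : Int) by omega,
      show ((i : Int) + 1) = ((i + 1 : Nat) : Int) by push_cast; ring,
      PySem.List.slice_natCast, show i + 1 - (i + 1 - w.length) = w.length by omega]
    exact h.symm
  · rintro ⟨hle, h⟩
    have hlt : (s.take (i+1)).length = i + 1 := by rw [List.length_take]; omega
    rw [hlt, List.drop_take, show i + 1 - (i + 1 - w.length) = w.length by omega]
    rw [show ((i : Int) + 1 - (w.length : Int)) = ((i + 1 - w.length : Nat) : Int) by omega,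
      show ((i : Int) + 1) = ((i + 1 : Nat) : Int) by push_cast; ring,
      PySem.List.slice_natCast, show i + 1 - (i + 1 - w.length) = w.length by omega] at h
    exact h.symm

lemma digit_char_cases (c : Char) (h : PySem.Chars.isdigit c = true) :
    c ∈ ['0','1','2','3','4','5','6','7','8','9'] := by
  simp only [PySem.Chars.isdigit, Bool.and_eq_true, decide_eq_true_eq] at h
  obtain ⟨h1, h2⟩ := h
  have b1 : 48 ≤ c.toNat := by exact_mod_cast Char.le_def.mp h1
  have b2 : c.toNat ≤ 57 := by exact_mod_cast Char.le_def.mp h2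
  rw [← Char.ofNat_toNat c]
  generalize c.toNat = n at b1 b2 ⊢
  interval_cases n <;> decide

lemma upper_char_cases (c : Char) (h : PySem.Chars.isupper c = true) :
    c ∈ ['A','B','C','D','E','F','G','H','I','J','K','L','M',
         'N','O','P','Q','R','S','T','U','V','W','X','Y','Z'] := by
  simp only [PySem.Chars.isupper, Bool.and_eq_true, decide_eq_true_eq] at h
  obtain ⟨h1, h2⟩ := h
  have b1 : 65 ≤ c.toNat := by exact_mod_cast Char.le_def.mp h1
  have b2 : c.toNat ≤ 90 := by exact_mod_cast Char.le_def.mp h2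
  rw [← Char.ofNat_toNat c]
  generalize c.toNat = n at b1 b2 ⊢
  interval_cases n <;> decide

lemma isdigit_lowerChar (c : Char) :
    PySem.Chars.isdigit (PySem.Chars.lowerChar c) = PySem.Chars.isdigit c := by
  by_cases h : PySem.Chars.isupper c = true
  · have := upper_char_cases c h
    fin_cases this <;> decide
  · simp [PySem.Chars.lowerChar, h]

lemma lowerChar_of_isdigit (c : Char) (h : PySem.Chars.isdigit c = true) :
    PySem.Chars.lowerChar c = c := by
  have := digit_char_cases c h
  fin_cases this <;> decide

lemma lowerChar_ne_zero (c : Char) (h : PySem.Chars.isdigit c = false) :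
    PySem.Chars.lowerChar c ≠ '0' := by
  intro h0
  have := isdigit_lowerChar c
  rw [h0] at this
  simp [h] at this
  exact absurd this.symm (by decide)

lemma getD_ofChars_digit_nonneg (c : Char) (h : PySem.Chars.isdigit c = true) :
    0 ≤ (PySem.Int.ofChars? [c]).getD 0 := by
  have := digit_char_cases c h
  fin_cases this <;> decide

def matchA (line : String) (i : Nat) : Option Int :=
  if PySem.Chars.isdigit (line.toList.getD i ' ') then
    some ((PySem.Int.ofChars? [line.toList.getD i ' ']).getD 0)
  else if as_number (PySem.Str.slice line (some 0) (some ((i : Nat) + 1))) ≥ 0 then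
    some (as_number (PySem.Str.slice line (some 0) (some ((i : Nat) + 1))))
  else none

lemma matchA_eq_tokenAtEnd (line : String) (i : Nat) (hi : i < line.toList.length) :
    matchA line i = tokenAtEnd ((PySem.Str.lower line).toList) i := by
  have hcs : (PySem.Str.lower line).toList = PySem.Chars.lower line.toList :=
    PySem.Str.toList_lower line
  rw [hcs]
  have hlen : (PySem.Chars.lower line.toList).length = line.toList.length := by
    simp [PySem.Chars.lower]
  have hget : (PySem.Chars.lower line.toList).getD i ' '
      = PySem.Chars.lowerChar (line.toList.getD i ' ') := by
    rw [List.getD_eq_getElem _ _ (by omega), List.getD_eq_getElem _ _ hi]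
    simp [PySem.Chars.lower]
  unfold matchA tokenAtEnd
  simp only [hget, isdigit_lowerChar]
  by_cases hd : PySem.Chars.isdigit (line.toList.getD i ' ') = true
  · simp only [hd, if_pos, lowerChar_of_isdigit _ hd]
  · -- non-digit branch
    simp only [hd, Bool.false_eq_true, if_neg, not_false_iff]
    have hsub : (PySem.Str.lower (PySem.Str.slice line (some 0) (some ((i : Nat) + 1)))).toList
        = (PySem.Chars.lower line.toList).take (i + 1) := by
      rw [PySem.Str.toList_lower, PySem.Str.toList_slice]
      rw [PySem.Chars.slice_eq_listSlice, PySem.List.slice_zero_start]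
      rw [show ((i : Int) + 1) = (((i + 1 : Nat)) : Int) by push_cast; ring]
      rw [PySem.List.slice_to_natCast]
      simp [PySem.Chars.lower, List.map_take]
    have hi' : i < (PySem.Chars.lower line.toList).length := by omega
    have ce := fun w => cond_eq (PySem.Chars.lower line.toList) w i hi'
    have hgetl : (PySem.Chars.lower line.toList)[i] = PySem.Chars.lowerChar (line.toList[i]) := by
      simp [PySem.Chars.lower]
    have h0 : (decide (i + 1 ≥ (['0'] : List Char).length)
        && (PySem.List.slice (PySem.Chars.lower line.toList)
              (some ((i : Int) + 1 - (((['0'] : List Char).length : Nat) : Int))) (some ((i : Int) + 1))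
            == (['0'] : List Char))) = false := by
      have hd' : PySem.Chars.isdigit (line.toList.getD i ' ') = false := by
        simpa using hd
      have hslice : PySem.List.slice (PySem.Chars.lower line.toList)
          (some ((i : Int) + 1 - (((['0'] : List Char).length : Nat) : Int))) (some ((i : Int) + 1))
          = [(PySem.Chars.lower line.toList)[i]] := by
        rw [show ((i : Int) + 1 - (((['0'] : List Char).length : Nat) : Int)) = ((i : Nat) : Int) by
              simp,
          show ((i : Int) + 1) = (((i + 1 : Nat)) : Int) by push_cast; ring,
          PySem.List.slice_natCast]
        rw [List.drop_eq_getElem_cons hi', show i + 1 - i = 1 from by omega]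
        rfl
      rw [hslice]
      simp only [Bool.and_eq_false_iff, beq_eq_false_iff_ne, ne_eq]
      right
      intro hlist
      have : (PySem.Chars.lower line.toList)[i] = '0' := by
        simpa using hlist
      rw [hgetl] at this
      exact lowerChar_ne_zero _ (by rw [← List.getD_eq_getElem line.toList ' ' hi]; simpa using hd) this
    have hchain : as_number (PySem.Str.slice line (some 0) (some ((i : Nat) + 1)))
        = match (pyWords.findSome? (fun vw =>
            if (decide (i + 1 ≥ vw.2.length)
                && (PySem.List.slice (PySem.Chars.lower line.toList)
                      (some ((i : Int) + 1 - (vw.2.length : Int))) (some ((i : Int) + 1)) == vw.2)) then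
              some vw.1
            else none)) with
          | some n => n
          | none => -1 := by
      unfold as_number as_number_items pyWords
      simp only [List.findSome?_cons, List.findSome?_nil, PySem.Str.endswith_eq, hsub,
        show "one".toList = ['o','n','e'] from rfl,
        show "two".toList = ['t','w','o'] from rfl,
        show "three".toList = ['t','h','r','e','e'] from rfl,
        show "four".toList = ['f','o','u','r'] from rfl,
        show "five".toList = ['f','i','v','e'] from rfl,
        show "six".toList = ['s','i','x'] from rfl,
        show "seven".toList = ['s','e','v','e','n'] from rfl,
        show "eight".toList = ['e','i','g','h','t'] from rfl,
        show "nine".toList = ['n','i','n','e'] from rfl,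
        show "0".toList = ['0'] from rfl, ce]
      simp only [h0, Bool.false_eq_true, if_neg, not_false_iff]
    rw [hchain]
    cases hc : (pyWords.findSome? (fun vw =>
        if (decide (i + 1 ≥ vw.2.length)
            && (PySem.List.slice (PySem.Chars.lower line.toList)
                  (some ((i : Int) + 1 - (vw.2.length : Int))) (some ((i : Int) + 1)) == vw.2)) then
          some vw.1
        else none)) with
    | none => simp
    | some v =>
      obtain ⟨a, ha, hfa⟩ := List.exists_of_findSome?_eq_some hc
      have hv : 0 ≤ v := by
        fin_cases ha <;> (split at hfa) <;> simp_all <;> omega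
      simp [hv]

def applyTok (st : Int × Int) (o : Option Int) : Int × Int :=
  match o with
  | none => st
  | some v => (if st.1 < 0 then v else st.1, v)

def pairOf (M : List Int) : Int × Int := (M.head?.getD (-1), M.getLast?.getD (-1))

lemma tokenAtEnd_nonneg (s : List Char) (j : Nat) (v : Int) (h : tokenAtEnd s j = some v) :
    0 ≤ v := by
  simp only [tokenAtEnd] at h
  split at h
  · rename_i hd
    cases h
    exact getD_ofChars_digit_nonneg _ hd
  · obtain ⟨a, ha, hfa⟩ := List.exists_of_findSome?_eq_some h
    fin_cases ha <;> (split at hfa) <;> simp_all <;> omega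

lemma matchA_nonneg (line : String) (i : Nat) (hi : i < line.toList.length) (v : Int)
    (h : matchA line i = some v) : 0 ≤ v := by
  rw [matchA_eq_tokenAtEnd line i hi] at h
  exact tokenAtEnd_nonneg _ _ _ h

lemma applyTok_pairOf (M : List Int) (hM : ∀ v ∈ M, 0 ≤ v) (o : Option Int)
    (ho : ∀ v, o = some v → 0 ≤ v) :
    applyTok (pairOf M) o = pairOf (M ++ o.toList) := by
  cases o with
  | none => simp [applyTok]
  | some v =>
    cases M with
    | nil => simp [applyTok, pairOf]
    | cons h t =>
      have hh : 0 ≤ h := hM h (List.mem_cons_self ..)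
      have hl : (h :: (t ++ [v])).getLast? = some v := by
        simpa using (List.getLast?_concat (l := h :: t) (a := v))
      simp [applyTok, pairOf, hl]
      omega

lemma enumerate_getElem? {α : Type} (t : List α) (s : Int) (k : Nat) :
    (PySem.List.enumerate t s)[k]? = t[k]?.map (fun c => (s + k, c)) := by
  induction t generalizing s k with
  | nil => simp [PySem.List.enumerate_nil]
  | cons x xs ih =>
    cases k with
    | zero => simp [PySem.List.enumerate_cons]
    | succ k =>
      rw [PySem.List.enumerate_cons]
      simp only [List.getElem?_cons_succ, ih]
      cases xs[k]? with
      | none => rfl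
      | some c =>
        simp only [Option.map_some]
        congr 2
        push_cast
        ring

lemma foldA (line : String) (k : Nat) (hk : k ≤ line.toList.length) :
    ((PySem.List.enumerate line.toList 0).take k).foldl
      (fun (st : Int × Int) (ic : Int × Char) =>
        let first_digit := st.1
        let last_digit := st.2
        let index := ic.1
        let char := ic.2
        let is_digit := PySem.Chars.isdigit char
        if is_digit then
          let d := (PySem.Int.ofChars? [char]).getD 0
          (if first_digit < 0 then d else first_digit, d)
        else
          let sub_str := PySem.Str.slice line (some 0) (some (index + 1))
          let num := as_number sub_str
          if num ≥ 0 then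
            (if first_digit < 0 then num else first_digit, num)
          else
            (first_digit, last_digit))
      (-1, -1)
    = pairOf ((List.range k).filterMap (matchA line)) := by
  induction k with
  | zero => simp [pairOf]
  | succ k ih =>
    have hk' : k ≤ line.toList.length := Nat.le_of_succ_le hk
    rw [List.take_add_one, List.foldl_append, ih hk']
    have he : (PySem.List.enumerate line.toList 0)[k]? = some (((0 : Int) + (k : Nat), line.toList.getD k ' ')) := by
      rw [enumerate_getElem?, List.getElem?_eq_getElem (by omega), List.getD_eq_getElem _ _ (by omega)]
      rfl
    rw [he]
    simp only [Option.toList_some, List.foldl_cons, List.foldl_nil, zero_add]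
    rw [List.range_succ, List.filterMap_append]
    have hstep :
        (let first_digit := (pairOf ((List.range k).filterMap (matchA line))).1
         let last_digit := (pairOf ((List.range k).filterMap (matchA line))).2
         let index := ((k : Nat) : Int)
         let char := line.toList.getD k ' '
         let is_digit := PySem.Chars.isdigit char
         if is_digit then
           let d := (PySem.Int.ofChars? [char]).getD 0
           (if first_digit < 0 then d else first_digit, d)
         else
           let sub_str := PySem.Str.slice line (some 0) (some (index + 1))
           let num := as_number sub_str
           if num ≥ 0 then
             (if first_digit < 0 then num else first_digit, num)
           else
             (first_digit, last_digit))
        = applyTok (pairOf ((List.range k).filterMap (matchA line))) (matchA line k) := by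
      simp only [matchA]
      by_cases hd : PySem.Chars.isdigit (line.toList.getD k ' ') = true
      · simp only [hd, if_true, applyTok]
      · simp only [hd, Bool.false_eq_true, if_false]
        rcases Int.lt_or_le (as_number (PySem.Str.slice line (some 0) (some ((k : Nat) + 1)))) 0 with hnum | hnum
        · rw [if_neg (by omega), if_neg (by omega)]
          simp only [applyTok]
        · rw [if_pos hnum, if_pos hnum]
          simp only [applyTok]
    rw [hstep]
    rw [applyTok_pairOf _ (by
        intro v hv
        obtain ⟨a, ha, hfa⟩ := List.mem_filterMap.mp hv
        rw [List.mem_range] at ha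
        exact matchA_nonneg line a (by omega) v hfa)
      _ (fun v hv => matchA_nonneg line k (by omega) v hv)]
    have hsing : List.filterMap (matchA line) [k] = (matchA line k).toList := by
      cases hmk : matchA line k <;> simp [hmk]
    rw [hsing]

lemma filterMap_tok_eq (line : String) :
    (List.range line.toList.length).filterMap (fun j => tokenAtEnd ((PySem.Str.lower line).toList) j)
    = (List.range line.toList.length).filterMap (matchA line) := by
  apply List.filterMap_congr
  intro i hi
  rw [List.mem_range] at hi
  exact (matchA_eq_tokenAtEnd line i hi).symm

lemma ab_eq (line : String) : line_to_number line = line_to_number_alt line := by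
  simp only [line_to_number, line_to_number_alt]
  have htake : (PySem.List.enumerate line.toList (0 : Int)).take line.toList.length
      = PySem.List.enumerate line.toList (0 : Int) := by
    rw [← PySem.List.length_enumerate line.toList (0 : Int), List.take_length]
  have hA := foldA line line.toList.length (le_refl _)
  rw [htake] at hA
  rw [hA]
  have hslen : ((PySem.Str.lower line).toList).length = line.toList.length := by
    rw [PySem.Str.toList_lower]
    simp [PySem.Chars.lower]
  rw [hslen]
  rw [← List.head?_filterMap, ← List.head?_filterMap, List.filterMap_reverse, List.head?_reverse]
  rw [filterMap_tok_eq]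
  rfl

-- ===== VERDICT (by name: the statement is the Claim_ definition above) =====
theorem line_to_number_spec : Claim_equal_line_to_number := by
  intro line _
  unfold Spec_line_to_number
  exact ab_eq line
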